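-- pv_equiv track=rewrite | github.com/Hercerthe/2110101-Comp-prog | Grader/05_List_xx/05_List_F11.py | missing_digits
-- ===== SOURCE A (Python) =====
-- def missing_digits(t):
--     digit = ["0", "1", "2", "3", "4", "5", "6", "7", "8", "9"]
--     data = t
--     result = []
--     for e in range(10) :
--         if digit[e] not in data :
--             result += [e]
--     return result
-- ===== SOURCE B (Python) =====
-- def missing_digits(t):
--     missing = list(range(10))
--     for c in t:
--         if '0' <= c <= '9':
--             d = ord(c) - 48
--             if d in missing:
--                 missing.remove(d)
--     return missing
-- ===== Notes on version B (the rewrite author's own statement) =====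
-- stated objective: alternative
-- what changed: A tests each of the ten digit strings for substring membership in t (ten scans of t, appending misses); B starts from the full list [0..9] and makes a single pass over t, deleting each digit it encounters from that list, so the survivors are exactly the missing digits in ascending order.
import Mathlib
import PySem

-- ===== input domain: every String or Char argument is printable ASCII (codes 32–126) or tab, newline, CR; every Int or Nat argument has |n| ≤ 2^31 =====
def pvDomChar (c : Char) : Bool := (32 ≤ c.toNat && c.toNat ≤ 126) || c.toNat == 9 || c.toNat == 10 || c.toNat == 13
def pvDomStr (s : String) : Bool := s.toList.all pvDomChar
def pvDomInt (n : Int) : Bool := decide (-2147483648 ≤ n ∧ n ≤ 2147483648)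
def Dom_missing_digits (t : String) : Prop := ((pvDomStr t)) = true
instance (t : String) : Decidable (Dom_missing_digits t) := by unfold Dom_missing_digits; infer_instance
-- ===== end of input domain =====

-- B replaces A's ten substring scans of t (appending each miss) by one pass over t that deletes
-- every digit it sees from the start list [0..9]; the survivors are the missing digits (alternative).

-- ===== PORT A =====
def missing_digits (t : String) : List Int :=
  let digit : List String := ["0", "1", "2", "3", "4", "5", "6", "7", "8", "9"]
  let data := t
  let result : List Int := []
  (PySem.List.pyRange 0 10 1).foldl
    (fun result e =>
      if !(PySem.Str.isIn (PySem.List.pyGetD digit e "") data) then result ++ [e] else result)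
    result

-- ===== PORT B =====
def missing_digits_alt (t : String) : List Int :=
  let missing : List Int := PySem.List.pyRange 0 10 1
  t.toList.foldl
    (fun missing c =>
      if '0' ≤ c ∧ c ≤ '9' then
        let d : Int := (c.toNat : Int) - 48
        if d ∈ missing then ((PySem.List.remove? missing d).getD missing) else missing
      else missing)
    missing

-- ===== PRECONDITION & SPEC =====
def Spec_missing_digits (t : String) (out : List Int) : Prop := out = missing_digits_alt t
instance (t : String) (out : List Int) : Decidable (Spec_missing_digits t out) := by unfold Spec_missing_digits; infer_instance

-- ===== CLAIM (what is proved, stated in full; the proofs are below) =====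
def Claim_equal_missing_digits : Prop := ∀ (t : String), Dom_missing_digits t → Spec_missing_digits t (missing_digits t)

-- ===== LEMMAS AND PROOFS =====

-- "digit value e occurs in cs"
def pvPresent (cs : List Char) (e : Int) : Bool :=
  cs.any (fun c => decide ('0' ≤ c ∧ c ≤ '9') && ((c.toNat : Int) - 48 == e))

-- B's loop body
def pvStep (missing : List Int) (c : Char) : List Int :=
  if '0' ≤ c ∧ c ≤ '9' then
    let d : Int := (c.toNat : Int) - 48
    if d ∈ missing then ((PySem.List.remove? missing d).getD missing) else missing
  else missing

theorem pv_step_eq (L : List Int) (c : Char) (hL : L.Nodup) (h1 : '0' ≤ c) (h2 : c ≤ '9') :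
    pvStep L c = L.filter (fun x => !((c.toNat : Int) - 48 == x)) := by
  have hcond : '0' ≤ c ∧ c ≤ '9' := ⟨h1, h2⟩
  simp only [pvStep, if_pos hcond]
  set d : Int := (c.toNat : Int) - 48 with hd
  by_cases hm : d ∈ L
  · rw [if_pos hm, PySem.List.remove?_eq_some_erase L d hm, Option.getD_some,
      List.Nodup.erase_eq_filter hL]
    apply List.filter_congr
    intro x _
    rw [bne, BEq.comm]
  · rw [if_neg hm, Eq.comm]
    apply List.filter_eq_self.mpr
    intro x hx
    simp only [Bool.not_eq_eq_eq_not, Bool.not_true, beq_eq_false_iff_ne]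
    intro he; exact hm (by rw [he]; exact hx)

theorem pv_fold_eq (cs : List Char) (L : List Int) (hL : L.Nodup) :
    cs.foldl pvStep L = L.filter (fun e => !pvPresent cs e) := by
  induction cs generalizing L with
  | nil => simp [pvPresent]
  | cons c cs ih =>
    simp only [List.foldl_cons]
    by_cases hdig : '0' ≤ c ∧ c ≤ '9'
    · rw [pv_step_eq L c hL hdig.1 hdig.2, ih _ (hL.filter _), List.filter_filter]
      apply List.filter_congr
      intro x _
      simp only [pvPresent, List.any_cons, Bool.not_or, decide_eq_true hdig]
      by_cases he : (c.toNat : Int) - 48 = x <;> simp [he, Bool.and_comm]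
    · have : pvStep L c = L := by simp [pvStep, hdig]
      rw [this, ih _ hL]
      apply List.filter_congr
      intro x _
      simp only [pvPresent, List.any_cons]
      have : (decide ('0' ≤ c) && decide (c ≤ '9')) = false := by
        rcases not_and_or.mp hdig with h | h <;> simp [h]
      simp [this]

theorem pv_singleton_infix_iff {c : Char} {l : List Char} : [c] <:+: l ↔ c ∈ l := by
  constructor
  · intro h; exact h.subset (List.mem_singleton_self c)
  · intro h
    obtain ⟨s, u, rfl⟩ := List.append_of_mem h
    exact ⟨s, u, by simp⟩

-- A's substring test for the digit string of k agrees with pvPresent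
theorem pv_cond_digit (t : String) (s : String) (c : Char) (k : Int)
    (hs : s.toList = [c]) (h1 : '0' ≤ c) (h2 : c ≤ '9') (hk : (c.toNat : Int) - 48 = k) :
    PySem.Str.isIn s t = pvPresent t.toList k := by
  have hL : PySem.Str.isIn s t = true ↔ c ∈ t.toList := by
    rw [PySem.Str.isIn_iff_infix, hs, pv_singleton_infix_iff]
  have hR : pvPresent t.toList k = true ↔ c ∈ t.toList := by
    simp only [pvPresent, List.any_eq_true, Bool.and_eq_true, decide_eq_true_eq, beq_iff_eq]
    constructor
    · rintro ⟨c', hm, ⟨hd1, hd2⟩, he⟩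
      have : c'.toNat = c.toNat := by omega
      have : c' = c := Char.ext (UInt32.toNat_inj.mp this)
      simpa [this] using hm
    · intro hm; exact ⟨c, hm, ⟨h1, h2⟩, hk⟩
  cases hA : PySem.Str.isIn s t <;> cases hB : pvPresent t.toList k <;> simp_all

theorem pv_A_eq (t : String) :
    missing_digits t =
      ([0,1,2,3,4,5,6,7,8,9] : List Int).filter
        (fun e => !(PySem.Str.isIn (PySem.List.pyGetD
            ["0", "1", "2", "3", "4", "5", "6", "7", "8", "9"] e "") t)) := by
  simp only [missing_digits]
  rw [show PySem.List.pyRange 0 10 1 = [0,1,2,3,4,5,6,7,8,9] from by decide]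
  have := PySem.List.foldl_append_if
    (fun e => !(PySem.Str.isIn (PySem.List.pyGetD
        ["0", "1", "2", "3", "4", "5", "6", "7", "8", "9"] e "") t))
    (fun e : Int => e) ([0,1,2,3,4,5,6,7,8,9] : List Int) []
  simpa using this

theorem pv_B_eq (t : String) :
    missing_digits_alt t =
      ([0,1,2,3,4,5,6,7,8,9] : List Int).filter (fun e => !pvPresent t.toList e) := by
  simp only [missing_digits_alt]
  rw [show PySem.List.pyRange 0 10 1 = [0,1,2,3,4,5,6,7,8,9] from by decide]
  exact pv_fold_eq t.toList _ (by decide)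

theorem pv_filters_agree (t : String) :
    (([0,1,2,3,4,5,6,7,8,9] : List Int).filter
        (fun e => !(PySem.Str.isIn (PySem.List.pyGetD
            ["0", "1", "2", "3", "4", "5", "6", "7", "8", "9"] e "") t)))
      = (([0,1,2,3,4,5,6,7,8,9] : List Int).filter (fun e => !pvPresent t.toList e)) := by
  apply List.filter_congr
  intro e he
  have : e = 0 ∨ e = 1 ∨ e = 2 ∨ e = 3 ∨ e = 4 ∨ e = 5 ∨ e = 6 ∨ e = 7 ∨ e = 8 ∨ e = 9 := by
    simpa using he
  rcases this with rfl | rfl | rfl | rfl | rfl | rfl | rfl | rfl | rfl | rfl <;>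
    [rw [show PySem.List.pyGetD ["0","1","2","3","4","5","6","7","8","9"] 0 "" = "0" from rfl,
        pv_cond_digit t "0" '0' 0 (by decide) (by decide) (by decide) (by decide)];
     rw [show PySem.List.pyGetD ["0","1","2","3","4","5","6","7","8","9"] 1 "" = "1" from rfl,
        pv_cond_digit t "1" '1' 1 (by decide) (by decide) (by decide) (by decide)];
     rw [show PySem.List.pyGetD ["0","1","2","3","4","5","6","7","8","9"] 2 "" = "2" from rfl,
        pv_cond_digit t "2" '2' 2 (by decide) (by decide) (by decide) (by decide)];
     rw [show PySem.List.pyGetD ["0","1","2","3","4","5","6","7","8","9"] 3 "" = "3" from rfl,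
        pv_cond_digit t "3" '3' 3 (by decide) (by decide) (by decide) (by decide)];
     rw [show PySem.List.pyGetD ["0","1","2","3","4","5","6","7","8","9"] 4 "" = "4" from rfl,
        pv_cond_digit t "4" '4' 4 (by decide) (by decide) (by decide) (by decide)];
     rw [show PySem.List.pyGetD ["0","1","2","3","4","5","6","7","8","9"] 5 "" = "5" from rfl,
        pv_cond_digit t "5" '5' 5 (by decide) (by decide) (by decide) (by decide)];
     rw [show PySem.List.pyGetD ["0","1","2","3","4","5","6","7","8","9"] 6 "" = "6" from rfl,
        pv_cond_digit t "6" '6' 6 (by decide) (by decide) (by decide) (by decide)];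
     rw [show PySem.List.pyGetD ["0","1","2","3","4","5","6","7","8","9"] 7 "" = "7" from rfl,
        pv_cond_digit t "7" '7' 7 (by decide) (by decide) (by decide) (by decide)];
     rw [show PySem.List.pyGetD ["0","1","2","3","4","5","6","7","8","9"] 8 "" = "8" from rfl,
        pv_cond_digit t "8" '8' 8 (by decide) (by decide) (by decide) (by decide)];
     rw [show PySem.List.pyGetD ["0","1","2","3","4","5","6","7","8","9"] 9 "" = "9" from rfl,
        pv_cond_digit t "9" '9' 9 (by decide) (by decide) (by decide) (by decide)]]

-- ===== VERDICT (by name: the statement is the Claim_ definition above) =====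
theorem missing_digits_spec : Claim_equal_missing_digits := by
  intro t _
  show missing_digits t = missing_digits_alt t
  rw [pv_A_eq, pv_B_eq, pv_filters_agree]
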